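-- pv_equiv track=rewrite | github.com/emmalobley/advent-of-code | day-6/wait_for_it.py | player_distance
-- ===== SOURCE A (Python) =====
-- from collections import deque
--
-- def get_time_held(time):
--     return list(range(1, time))
--
-- def player_distance(time):
--     play_dist = []
--     held = deque(get_time_held(time))
--     while 0 < len(held):
--         new = 0
--         if len(held) == 1:
--             new = held.pop()
--             play_dist.append(new*new)
--         else:
--             new = held.pop()*held.popleft()
--             play_dist.append(new)
--             play_dist.append(new)
--     return play_dist
-- ===== SOURCE B (Python) =====
-- def player_distance(time):
--     out = []
--     for t in range(1, (time + 1) // 2):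
--         d = t * (time - t)
--         out.append(d)
--         out.append(d)
--     if time >= 2 and time % 2 == 0:
--         out.append((time // 2) * (time // 2))
--     return out
-- ===== Notes on version B (the rewrite author's own statement) =====
-- stated objective: simpler
-- what changed: A pairs hold times off both ends of a deque (pop*popleft, branching on length 1); B exploits the symmetry of t*(time-t) and emits each paired distance twice in one forward loop over the first half of the range, appending the closed-form middle square when time is even — avoiding building the full range list and the deque.
import Mathlib
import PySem

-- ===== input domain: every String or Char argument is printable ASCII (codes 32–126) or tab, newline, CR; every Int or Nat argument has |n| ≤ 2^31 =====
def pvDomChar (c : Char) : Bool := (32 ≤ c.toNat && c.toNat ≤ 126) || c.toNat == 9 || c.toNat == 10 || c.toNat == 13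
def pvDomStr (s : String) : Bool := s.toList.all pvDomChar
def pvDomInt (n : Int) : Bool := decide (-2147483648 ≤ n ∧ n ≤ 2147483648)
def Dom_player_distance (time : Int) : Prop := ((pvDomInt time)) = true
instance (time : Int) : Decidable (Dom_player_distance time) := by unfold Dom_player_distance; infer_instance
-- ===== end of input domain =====

-- B replaces A's double-ended deque pairing by a single forward loop over the first half
-- of the hold times plus a closed-form middle element (objective: simpler; same cost).

-- ===== PORT A =====
-- held.pop() * held.popleft() on a deque of length ≥ 2: last element times first element,
-- then both are removed; transliterated as recursion on the list (getLast / dropLast / tail).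
def pdLoop : List Int → List Int → List Int
  | [], acc => acc
  | [x], acc => acc ++ [x * x]
  | a :: b :: rest, acc =>
      let last := (b :: rest).getLast (by simp)
      let nw := last * a
      pdLoop ((b :: rest).dropLast) (acc ++ [nw, nw])
  termination_by held _ => held.length
  decreasing_by simp [List.length_dropLast]

def get_time_held (time : Int) : List Int := PySem.List.pyRange 1 time 1

def player_distance (time : Int) : List Int :=
  pdLoop (get_time_held time) []

-- ===== PORT B =====
def player_distance_alt (time : Int) : List Int :=
  let core := (PySem.List.pyRange 1 (PySem.Int.floordiv (time + 1) 2) 1).foldl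
      (fun acc t => let d := t * (time - t); acc ++ [d, d]) []
  if 2 ≤ time ∧ PySem.Int.mod time 2 = 0 then
    core ++ [PySem.Int.floordiv time 2 * PySem.Int.floordiv time 2]
  else core

-- ===== PRECONDITION & SPEC =====
def Spec_player_distance (time : Int) (out : List Int) : Prop := out = player_distance_alt time
instance (time : Int) (out : List Int) : Decidable (Spec_player_distance time out) := by unfold Spec_player_distance; infer_instance

-- ===== CLAIM (what is proved, stated in full; the proofs are below) =====
def Claim_equal_player_distance : Prop := ∀ (time : Int), Dom_player_distance time → Spec_player_distance time (player_distance time)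

-- ===== LEMMAS AND PROOFS =====

theorem pdLoop_nil (acc : List Int) : pdLoop [] acc = acc := by rw [pdLoop]

theorem pdLoop_single (x : Int) (acc : List Int) : pdLoop [x] acc = acc ++ [x*x] := by
  rw [pdLoop]

theorem pdLoop_cons2 (a b : Int) (rest acc : List Int) :
    pdLoop (a::b::rest) acc =
      pdLoop ((b::rest).dropLast)
        (acc ++ [(b::rest).getLast (by simp) * a, (b::rest).getLast (by simp) * a]) := by
  rw [pdLoop]

theorem pdLoop_cons_append (a L : Int) (xs acc : List Int) :
    pdLoop (a :: (xs ++ [L])) acc = pdLoop xs (acc ++ [L * a, L * a]) := by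
  cases xs with
  | nil => rw [show a :: ([] ++ [L]) = [a, L] by simp, pdLoop_cons2]; simp
  | cons y ys =>
      rw [show a :: (y :: ys ++ [L]) = a :: y :: (ys ++ [L]) by simp, pdLoop_cons2]
      simp
      rw [← List.cons_append, List.dropLast_concat]

-- A's loop on a contiguous ascending run, characterised recursively.
def G (a : Int) : Nat → List Int
  | 0 => []
  | 1 => [a * a]
  | (k+2) => ((a + k + 1) * a) :: ((a + k + 1) * a) :: G (a + 1) k

theorem pdLoop_range (k : Nat) : ∀ (a : Int) (acc : List Int),
    pdLoop (PySem.List.pyRange a (a + k) 1) acc = acc ++ G a k := by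
  induction k using Nat.strong_induction_on with
  | _ k ih =>
    match k with
    | 0 =>
        intro a acc
        rw [show (a + ((0:Nat):Int)) = a by push_cast; ring,
            PySem.List.pyRange_one_eq_nil le_rfl, pdLoop_nil]
        simp [G]
    | 1 =>
        intro a acc
        rw [show (a + ((1:Nat):Int)) = a + 1 by push_cast; ring,
            PySem.List.pyRange_one_singleton, pdLoop_single]
        simp [G]
    | (k+2) =>
        intro a acc
        have h1 : PySem.List.pyRange a (a + ((k+2:Nat):Int)) 1
            = a :: PySem.List.pyRange (a+1) (a + ((k+2:Nat):Int)) 1 :=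
          PySem.List.pyRange_one_cons (by push_cast; omega)
        have h2 : PySem.List.pyRange (a+1) (a + ((k+2:Nat):Int)) 1
            = PySem.List.pyRange (a+1) ((a+1) + (k:Int)) 1 ++ [(a+1) + (k:Int)] := by
          rw [show (a + ((k+2:Nat):Int)) = ((a+1) + (k:Int)) + 1 by push_cast; ring]
          exact PySem.List.pyRange_one_succ_right (by omega)
        rw [h1, h2, pdLoop_cons_append,
            show ((a+1) + (k:Int)) = (a+1) + ((k:Nat):Int) by norm_cast,
            ih k (by omega)]
        have hp : ((a+1) + ((k:Nat):Int)) * a = (a + (k:Int) + 1) * a := by ring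
        show acc ++ [_, _] ++ G (a+1) k = acc ++ G a (k+2)
        rw [hp, show G a (k+2) = ((a + (k:Int) + 1) * a) :: ((a + (k:Int) + 1) * a) :: G (a + 1) k from rfl]
        simp

-- G on an even-length run of j pairs: the paired ends always sum to s.
theorem G_even (j : Nat) : ∀ (a s : Int), s = 2*a + 2*(j:Int) - 1 →
    G a (2*j) = (PySem.List.pyRange a (a + (j:Int)) 1).flatMap
      (fun t => [t*(s-t), t*(s-t)]) := by
  induction j with
  | zero => intro a s _; simp [G, PySem.List.pyRange_one_eq_nil]
  | succ j ih =>
      intro a s hs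
      have h1 : PySem.List.pyRange a (a + ((j+1:Nat):Int)) 1
          = a :: PySem.List.pyRange (a+1) ((a+1) + (j:Int)) 1 := by
        rw [PySem.List.pyRange_one_cons (by push_cast; omega)]
        congr 2
        push_cast; ring
      rw [show 2*(j+1) = 2*j+2 by omega,
          show G a (2*j+2) = ((a + ((2*j:Nat):Int) + 1) * a) :: ((a + ((2*j:Nat):Int) + 1) * a) :: G (a+1) (2*j) from rfl,
          h1, ih (a+1) s (by push_cast at hs ⊢; omega)]
      have hp : (a + ((2*j:Nat):Int) + 1) * a = a * (s - a) := by
        rw [hs]; push_cast; ring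
      rw [hp]
      simp

theorem G_odd (j : Nat) : ∀ (a s : Int), s = 2*a + 2*(j:Int) →
    G a (2*j+1) = (PySem.List.pyRange a (a + (j:Int)) 1).flatMap
      (fun t => [t*(s-t), t*(s-t)]) ++ [(a + (j:Int)) * (a + (j:Int))] := by
  induction j with
  | zero => intro a s _; simp [G, PySem.List.pyRange_one_eq_nil]
  | succ j ih =>
      intro a s hs
      have h1 : PySem.List.pyRange a (a + ((j+1:Nat):Int)) 1
          = a :: PySem.List.pyRange (a+1) ((a+1) + (j:Int)) 1 := by
        rw [PySem.List.pyRange_one_cons (by push_cast; omega)]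
        congr 2
        push_cast; ring
      rw [show 2*(j+1)+1 = (2*j+1)+2 by omega,
          show G a ((2*j+1)+2) = ((a + ((2*j+1:Nat):Int) + 1) * a) :: ((a + ((2*j+1:Nat):Int) + 1) * a) :: G (a+1) (2*j+1) from rfl,
          h1, ih (a+1) s (by push_cast at hs ⊢; omega)]
      have hp : (a + ((2*j+1:Nat):Int) + 1) * a = a * (s - a) := by
        rw [hs]; push_cast; ring
      have hm : (a + 1 + (j:Int)) = a + ((j:Int) + 1) := by ring
      rw [hp, hm]
      simp

-- ===== VERDICT (by name: the statement is the Claim_ definition above) =====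
theorem player_distance_spec : Claim_equal_player_distance := by
  intro time _
  show player_distance time = player_distance_alt time
  unfold player_distance player_distance_alt get_time_held
  rw [PySem.List.foldl_append_eq_flatMap
    (g := fun t => [t*(time-t), t*(time-t)])]
  simp only [List.nil_append]
  by_cases htle : time ≤ 1
  · -- no held times at all
    have hm : PySem.Int.floordiv (time + 1) 2 ≤ 1 := by
      have h := (PySem.Int.floordiv_lt_iff_lt_mul (a := time + 1) (b := 2) (q := 2) (by norm_num)).2 (by omega)
      omega
    rw [PySem.List.pyRange_one_eq_nil htle, PySem.List.pyRange_one_eq_nil hm, pdLoop_nil]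
    rw [if_neg (by omega)]
    simp
  · rcases Int.even_or_odd time with ⟨c, hc⟩ | ⟨c, hc⟩
    · -- time = 2c even, c ≥ 1: middle hold time c, distance c*c
      have hc1 : 1 ≤ c := by omega
      set j : Nat := (c - 1).toNat with hj
      have hjc : (j : Int) = c - 1 := by omega
      have hrange : time = 1 + ((2*j+1 : Nat) : Int) := by push_cast; omega
      rw [hrange, pdLoop_range (2*j+1) 1 [], List.nil_append,
          G_odd j 1 (1 + ((2*j+1:Nat):Int)) (by push_cast; omega)]
      have hm : PySem.Int.floordiv ((1 + ((2*j+1:Nat):Int)) + 1) 2 = c := by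
        rw [PySem.Int.floordiv_eq_iff_of_pos (by norm_num)]
        push_cast; omega
      have hmod : PySem.Int.mod (1 + ((2*j+1:Nat):Int)) 2 = 0 := by
        rw [PySem.Int.mod_eq_zero_iff_dvd]
        exact ⟨c, by push_cast; omega⟩
      have hfd : PySem.Int.floordiv (1 + ((2*j+1:Nat):Int)) 2 = c := by
        rw [PySem.Int.floordiv_eq_iff_of_pos (by norm_num)]
        push_cast; omega
      rw [hm, hmod, hfd, if_pos ⟨by push_cast; omega, rfl⟩,
          show ((1:Int) + (j:Int)) = c by omega]
    · -- time = 2c+1 odd, c ≥ 1: no middle element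
      have hc1 : 1 ≤ c := by omega
      set j : Nat := c.toNat with hj
      have hjc : (j : Int) = c := by omega
      have hrange : time = 1 + ((2*j : Nat) : Int) := by push_cast; omega
      rw [hrange, pdLoop_range (2*j) 1 [], List.nil_append,
          G_even j 1 (1 + ((2*j:Nat):Int)) (by push_cast; omega)]
      have hm : PySem.Int.floordiv ((1 + ((2*j:Nat):Int)) + 1) 2 = c + 1 := by
        rw [PySem.Int.floordiv_eq_iff_of_pos (by norm_num)]
        push_cast; omega
      have hmod : PySem.Int.mod (1 + ((2*j:Nat):Int)) 2 = 1 := by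
        rcases PySem.Int.mod_two_eq (1 + ((2*j:Nat):Int)) with h | h
        · exfalso
          rw [PySem.Int.mod_eq_zero_iff_dvd] at h
          rcases h with ⟨d, hd⟩
          omega
        · exact h
      rw [hm, hmod, if_neg (by simp),
          show ((1:Int) + (j:Int)) = c + 1 by omega]
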